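-- pv_equiv track=rewrite | github.com/MuteMuty/Sola | python/orbite.py | enaka_struktura
-- ===== SOURCE A (Python) =====
-- def lune(orbite):
--     slovar = {}
--     for key, value in orbite.items():
--         if value not in slovar:
--             slovar[value] = {key}
--         else:
--             slovar[value].add(key)
--     return slovar
--
-- def sirina_orbite(luna, razdalja, orbite):
--     if razdalja == 0:
--         return 1
--     slovar = lune(orbite)
--     if luna in slovar.keys():
--         resitev = list(slovar[luna])
--     else:
--         resitev = []
--     nov = []
--     counter = 1
--     while counter < razdalja:
--         counter += 1
--         for x in resitev:
--             if x in slovar.keys():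
--                 nov.extend(list(slovar[x]))
--         resitev.clear()
--         resitev = nov.copy()
--         nov.clear()
--     return len(resitev)
--
-- def enaka_struktura(luna1, luna2, orbite):
--     seznam1 = []
--     seznam2 = []
--     resitev = True
--     for x in range(10):
--         seznam1.extend([sirina_orbite(luna1, x, orbite)])
--         seznam2.extend([sirina_orbite(luna2, x, orbite)])
--     for i, j in zip(seznam1, seznam2):
--         if i != j:
--             resitev = False
--             break
--     return resitev
-- ===== SOURCE B (Python) =====
-- def enaka_struktura(luna1, luna2, orbite):
--     # Build the parent -> children map once, then one depth-capped DFS per moon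
--     # producing its whole 10-entry descendant-count-by-distance profile.
--     children = {}
--     for key, value in orbite.items():
--         children.setdefault(value, set()).add(key)
--
--     def profil(moon):
--         prof = [0] * 10
--
--         def dfs(node, d):
--             if d >= 10:
--                 return
--             prof[d] += 1
--             for c in children.get(node, ()):
--                 dfs(c, d + 1)
--
--         dfs(moon, 0)
--         return prof
--
--     return profil(luna1) == profil(luna2)
-- ===== Notes on version B (the rewrite author's own statement) =====
-- stated objective: faster
-- what changed: A rebuilds the parent-to-children map from scratch for every distance 0..9 (twice per distance, once per moon) and runs a fresh iterative breadth scan each time; B builds the map once and fills each moon's whole 10-entry distance profile with a single depth-capped recursive DFS, then compares the two profiles.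
import Mathlib
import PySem

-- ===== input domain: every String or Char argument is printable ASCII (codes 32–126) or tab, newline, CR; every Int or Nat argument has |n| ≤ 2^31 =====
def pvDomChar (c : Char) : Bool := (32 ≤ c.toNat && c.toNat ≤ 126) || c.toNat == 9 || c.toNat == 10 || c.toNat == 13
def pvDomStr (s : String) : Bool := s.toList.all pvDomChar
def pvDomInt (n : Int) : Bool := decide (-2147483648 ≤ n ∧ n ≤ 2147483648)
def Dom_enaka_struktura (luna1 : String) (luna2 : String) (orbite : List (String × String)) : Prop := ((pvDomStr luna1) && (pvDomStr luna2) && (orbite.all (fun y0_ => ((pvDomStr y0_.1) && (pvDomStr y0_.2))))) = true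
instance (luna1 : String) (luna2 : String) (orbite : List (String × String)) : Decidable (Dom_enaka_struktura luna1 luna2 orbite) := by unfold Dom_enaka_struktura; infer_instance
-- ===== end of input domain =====

-- B replaces A's per-distance recomputation (ten rebuilds of the parent→children map and a
-- fresh breadth scan per distance, per moon) by one map build and one depth-capped DFS per
-- moon filling the whole 10-entry profile at once; objective: faster (constant-factor).

-- ===== PORT A =====

-- A's `lune`: group keys by their value (dict value → set of keys)
def lune (orbite : List (String × String)) : PySem.Dict String (PySem.Set String) :=
  orbite.foldl (fun slovar kv =>
    if slovar.contains kv.2 = false then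
      slovar.insert kv.2 (PySem.Set.ofList [kv.1])
    else
      slovar.insert kv.2 (PySem.Set.add (slovar.getD kv.2 PySem.Set.empty) kv.1))
    PySem.Dict.empty

-- A's `while counter < razdalja` loop, one iteration per fuel unit
def sirinaLoop (slovar : PySem.Dict String (PySem.Set String)) :
    Nat → List String → List String
  | 0, resitev => resitev
  | k + 1, resitev =>
      let nov := resitev.foldl (fun nov x =>
        if slovar.contains x then nov ++ (slovar.getD x PySem.Set.empty) else nov) []
      sirinaLoop slovar k nov

def sirina_orbite (luna : String) (razdalja : Int) (orbite : List (String × String)) : Int :=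
  if razdalja = 0 then 1
  else
    let slovar := lune orbite
    let resitev := if slovar.contains luna then (slovar.getD luna PySem.Set.empty : List String) else []
    ((sirinaLoop slovar (razdalja - 1).toNat resitev).length : Int)

-- A's zip comparison loop with early break
def zipCheck : List (Int × Int) → Bool
  | [] => true
  | p :: rest => if p.1 ≠ p.2 then false else zipCheck rest

def enaka_struktura (luna1 : String) (luna2 : String) (orbite : List (String × String)) : Bool :=
  let s := (PySem.List.pyRange 0 10 1).foldl
    (fun acc x => (acc.1 ++ [sirina_orbite luna1 x orbite], acc.2 ++ [sirina_orbite luna2 x orbite]))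
    ([], [])
  zipCheck (s.1.zip s.2)

-- ===== PORT B =====

-- B builds the parent → children map once: children.setdefault(value, set()).add(key)
def bChildren (orbite : List (String × String)) : PySem.Dict String (PySem.Set String) :=
  orbite.foldl (fun ch kv => ch.modify kv.2 PySem.Set.empty (fun s => PySem.Set.add s kv.1))
    PySem.Dict.empty

-- B's dfs: prof[d] += 1, then recurse into the node's children with d+1; cut off at depth 10
def bDfs (ch : PySem.Dict String (PySem.Set String)) (d : Nat) (node : String)
    (prof : List Int) : List Int :=
  if d ≥ 10 then prof
  else
    ((ch.getD node PySem.Set.empty : List String)).foldl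
      (fun p c => bDfs ch (d + 1) c p) (prof.modify d (· + 1))
  termination_by 10 - d

def bProfil (ch : PySem.Dict String (PySem.Set String)) (moon : String) : List Int :=
  bDfs ch 0 moon (List.replicate 10 0)

def enaka_struktura_alt (luna1 : String) (luna2 : String) (orbite : List (String × String)) : Bool :=
  let ch := bChildren orbite
  bProfil ch luna1 == bProfil ch luna2

-- ===== PRECONDITION & SPEC =====
def Spec_enaka_struktura (luna1 : String) (luna2 : String) (orbite : List (String × String)) (out : Bool) : Prop := out = enaka_struktura_alt luna1 luna2 orbite
instance (luna1 : String) (luna2 : String) (orbite : List (String × String)) (out : Bool) : Decidable (Spec_enaka_struktura luna1 luna2 orbite out) := by unfold Spec_enaka_struktura; infer_instance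

-- ===== CLAIM (what is proved, stated in full; the proofs are below) =====
def Claim_equal_enaka_struktura : Prop := ∀ (luna1 : String) (luna2 : String) (orbite : List (String × String)), Dom_enaka_struktura luna1 luna2 orbite → Spec_enaka_struktura luna1 luna2 orbite (enaka_struktura luna1 luna2 orbite)

-- ===== LEMMAS AND PROOFS =====

-- children of x as a plain list ([] for an absent parent), read off B's map
def childL (ch : PySem.Dict String (PySem.Set String)) (x : String) : List String :=
  (ch.getD x PySem.Set.empty : List String)

-- the nodes reached from ns in exactly k steps, with path multiplicity
def lvl (ch : PySem.Dict String (PySem.Set String)) : List String → Nat → List String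
  | ns, 0 => ns
  | ns, k + 1 => lvl ch (ns.flatMap (childL ch)) k

-- ---- A's dict and B's dict agree pointwise (contains and getD) ----

def dictRel (d1 d2 : PySem.Dict String (PySem.Set String)) : Prop :=
  ∀ v, d1.contains v = d2.contains v ∧ d1.getD v PySem.Set.empty = d2.getD v PySem.Set.empty

theorem dictRel_step (d1 d2 : PySem.Dict String (PySem.Set String)) (h : dictRel d1 d2)
    (kv : String × String) :
    dictRel
      (if d1.contains kv.2 = false then d1.insert kv.2 (PySem.Set.ofList [kv.1])
       else d1.insert kv.2 (PySem.Set.add (d1.getD kv.2 PySem.Set.empty) kv.1))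
      (d2.modify kv.2 PySem.Set.empty (fun s => PySem.Set.add s kv.1)) := by
  intro w
  obtain ⟨hc, hg⟩ := h kv.2
  by_cases hw : w = kv.2
  · subst hw
    cases hcon : d1.contains kv.2 with
    | false =>
      have h2 : d2.getD kv.2 PySem.Set.empty = PySem.Set.empty :=
        PySem.Dict.getD_of_not_contains d2 PySem.Set.empty (by rw [← hc, hcon])
      refine ⟨?_, ?_⟩
      · simp [PySem.Dict.contains_modify]
      · rw [if_pos rfl, PySem.Dict.getD_insert_self, PySem.Dict.getD_modify, if_pos rfl, h2]
        rfl
    | true =>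
      refine ⟨?_, ?_⟩
      · simp [PySem.Dict.contains_modify]
      · rw [if_neg (by simp), PySem.Dict.getD_insert_self, PySem.Dict.getD_modify,
          if_pos rfl, hg]
  · have hins : ∀ s, (d1.insert kv.2 s).contains w = d1.contains w := by
      intro s; rw [PySem.Dict.contains_insert]; simp [hw]
    have hmod : (d2.modify kv.2 PySem.Set.empty (fun s => PySem.Set.add s kv.1)).contains w
        = d2.contains w := by
      rw [PySem.Dict.contains_modify]; simp [hw]
    refine ⟨?_, ?_⟩
    · split_ifs <;> rw [hins, hmod] <;> exact (h w).1
    · split_ifs <;>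
        rw [PySem.Dict.getD_insert_of_ne _ _ _ hw, PySem.Dict.getD_modify, if_neg hw] <;>
        exact (h w).2

theorem dictRel_foldl (orbite : List (String × String)) :
    ∀ (d1 d2 : PySem.Dict String (PySem.Set String)), dictRel d1 d2 →
    dictRel
      (orbite.foldl (fun slovar kv =>
        if slovar.contains kv.2 = false then slovar.insert kv.2 (PySem.Set.ofList [kv.1])
        else slovar.insert kv.2 (PySem.Set.add (slovar.getD kv.2 PySem.Set.empty) kv.1)) d1)
      (orbite.foldl (fun ch kv => ch.modify kv.2 PySem.Set.empty (fun s => PySem.Set.add s kv.1)) d2) := by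
  induction orbite with
  | nil => intro d1 d2 h; exact h
  | cons kv rest ih =>
    intro d1 d2 h
    exact ih _ _ (dictRel_step d1 d2 h kv)

theorem lune_rel (orbite : List (String × String)) : dictRel (lune orbite) (bChildren orbite) :=
  dictRel_foldl orbite _ _ (fun _ => ⟨rfl, rfl⟩)

-- ---- A's result is the length of lvl ----

theorem fold_nov_eq (orbite : List (String × String)) (ns : List String) :
    ns.foldl (fun nov x =>
      if (lune orbite).contains x then nov ++ ((lune orbite).getD x PySem.Set.empty : List String)
      else nov) [] = ns.flatMap (childL (bChildren orbite)) := by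
  have hstep : (fun (nov : List String) (x : String) =>
      if (lune orbite).contains x then nov ++ ((lune orbite).getD x PySem.Set.empty : List String)
      else nov) = fun nov x => nov ++ childL (bChildren orbite) x := by
    funext nov x
    obtain ⟨hc, hg⟩ := lune_rel orbite x
    by_cases hx : (lune orbite).contains x
    · rw [if_pos hx, childL, ← hg]
    · rw [if_neg hx, childL, ← hg]
      rw [PySem.Dict.getD_of_not_contains _ _ (Bool.not_eq_true _ ▸ hx)]
      simp [PySem.Set.empty]
  rw [hstep, PySem.List.foldl_append_eq_flatMap, List.nil_append]

theorem sirinaLoop_eq (orbite : List (String × String)) :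
    ∀ (k : Nat) (ns : List String),
    sirinaLoop (lune orbite) k ns = lvl (bChildren orbite) ns k := by
  intro k
  induction k with
  | zero => intro ns; rfl
  | succ k ih =>
    intro ns
    show sirinaLoop (lune orbite) k _ = lvl (bChildren orbite) (ns.flatMap (childL (bChildren orbite))) k
    rw [← fold_nov_eq orbite ns]
    exact ih _

theorem sirina_eq (luna : String) (orbite : List (String × String)) (x : Int) (hx : 0 ≤ x) :
    sirina_orbite luna x orbite = ((lvl (bChildren orbite) [luna] x.toNat).length : Int) := by
  by_cases h0 : x = 0
  · subst h0; rfl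
  · have hpos : 0 < x := lt_of_le_of_ne hx (Ne.symm h0)
    rw [sirina_orbite, if_neg h0]
    obtain ⟨hc, hg⟩ := lune_rel orbite luna
    have hres : (if (lune orbite).contains luna
        then ((lune orbite).getD luna PySem.Set.empty : List String) else [])
        = childL (bChildren orbite) luna := by
      by_cases hl : (lune orbite).contains luna
      · rw [if_pos hl, childL, ← hg]
      · rw [if_neg hl, childL, ← hg]
        rw [PySem.Dict.getD_of_not_contains _ _ (Bool.not_eq_true _ ▸ hl)]
        rfl
    show ((sirinaLoop (lune orbite) (x - 1).toNat (if (lune orbite).contains luna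
        then ((lune orbite).getD luna PySem.Set.empty : List String) else [])).length : Int) = _
    rw [hres, sirinaLoop_eq]
    have hk : ∃ k : Nat, x = (k + 1 : Nat) := ⟨(x - 1).toNat, by omega⟩
    obtain ⟨k, hk⟩ := hk
    subst hk
    have h1 : ((k + 1 : Nat) : Int).toNat = k + 1 := by omega
    have h2 : (((k + 1 : Nat) : Int) - 1).toNat = k := by omega
    rw [h1, h2]
    congr 1
    show (lvl (bChildren orbite) (childL (bChildren orbite) luna) k).length
        = (lvl (bChildren orbite) ([luna].flatMap (childL (bChildren orbite))) k).length
    simp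

-- ---- B's dfs computes the lvl profile ----

theorem modify_id_fun (l : List Int) (i : Nat) : l.modify i (fun a => a) = l := by
  induction l generalizing i with
  | nil => simp
  | cons x xs ih => cases i <;> simp [List.modify_zero_cons, List.modify_succ_cons, ih]

theorem modify_modify_same (l : List Int) (i : Nat) (f g : Int → Int) :
    (l.modify i f).modify i g = l.modify i (fun a => g (f a)) := by
  induction l generalizing i with
  | nil => simp
  | cons x xs ih => cases i <;> simp [List.modify_zero_cons, List.modify_succ_cons, ih]

theorem modify_append_mid (pre rest : List Int) (x : Int) (f : Int → Int) :
    (pre ++ x :: rest).modify pre.length f = pre ++ f x :: rest := by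
  induction pre with
  | nil => simp
  | cons y ys ih => simpa [List.modify_succ_cons] using ih

-- a bump at a shallower index commutes with a dfs started strictly deeper
theorem bDfs_modify (ch : PySem.Dict String (PySem.Set String)) (i : Nat) (f : Int → Int) :
    ∀ (r d : Nat), 10 - d ≤ r → i < d → ∀ (n : String) (p : List Int),
    bDfs ch d n (p.modify i f) = (bDfs ch d n p).modify i f := by
  intro r
  induction r with
  | zero =>
    intro d hr hi n p
    have hd : d ≥ 10 := by omega
    rw [bDfs, bDfs, if_pos hd, if_pos hd]
  | succ r ih =>
    intro d hr hi n p
    by_cases hd : d ≥ 10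
    · rw [bDfs, bDfs, if_pos hd, if_pos hd]
    · rw [bDfs, bDfs, if_neg hd, if_neg hd]
      rw [List.modify_modify_ne f (· + 1) _ (by omega)]
      generalize (ch.getD n PySem.Set.empty : List String) = l
      generalize (p.modify d (· + 1)) = q
      induction l generalizing q with
      | nil => rfl
      | cons c cs ihl =>
        show List.foldl _ (bDfs ch (d+1) c (q.modify i f)) cs = _
        rw [ih (d + 1) (by omega) (by omega) c q]
        exact ihl _

theorem bDfs_foldl_modify (ch : PySem.Dict String (PySem.Set String)) (i : Nat) (f : Int → Int)
    (d : Nat) (hi : i < d) (l : List String) :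
    ∀ (p : List Int),
    l.foldl (fun p c => bDfs ch d c p) (p.modify i f)
      = (l.foldl (fun p c => bDfs ch d c p) p).modify i f := by
  induction l with
  | nil => intro p; rfl
  | cons c cs ih =>
    intro p
    show List.foldl _ (bDfs ch d c (p.modify i f)) cs = _
    rw [bDfs_modify ch i f (10 - d) d (le_refl _) hi c p]
    exact ih _

-- one dfs layer: visiting every node of ns bumps index d by |ns| and descends to the next level
theorem bDfs_fold_level (ch : PySem.Dict String (PySem.Set String)) (d : Nat) (hd : d < 10) :
    ∀ (ns : List String) (p : List Int),
    ns.foldl (fun p n => bDfs ch d n p) p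
      = (ns.flatMap (childL ch)).foldl (fun p n => bDfs ch (d + 1) n p)
          (p.modify d (· + (ns.length : Int))) := by
  intro ns
  induction ns with
  | nil =>
    intro p
    show p = [].foldl _ (p.modify d (· + (0:Int)))
    have : p.modify d (· + (0:Int)) = p := by
      have h0 : (fun a : Int => a + 0) = (fun a : Int => a) := by funext a; omega
      rw [h0, modify_id_fun]
    rw [this]; rfl
  | cons n ns ih =>
    intro p
    show List.foldl _ (bDfs ch d n p) ns = _
    rw [bDfs, if_neg (by omega)]
    rw [ih]
    rw [← bDfs_foldl_modify ch d (· + (ns.length : Int)) (d + 1) (by omega)]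
    rw [modify_modify_same]
    have hcomb : (fun a : Int => a + 1 + ns.length) = (fun a : Int => a + ((n :: ns).length : Int)) := by
      funext a; simp; omega
    rw [hcomb]
    show _ = ((childL ch n ++ ns.flatMap (childL ch)).foldl _ _)
    rw [List.foldl_append]
    rfl

theorem bDfs_prof (ch : PySem.Dict String (PySem.Set String)) :
    ∀ (r d : Nat), d + r = 10 → ∀ (ns : List String) (pre : List Int), pre.length = d →
    ns.foldl (fun p n => bDfs ch d n p) (pre ++ List.replicate r 0)
      = pre ++ (List.range r).map (fun k => ((lvl ch ns k).length : Int)) := by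
  intro r
  induction r with
  | zero =>
    intro d hd ns pre hpre
    simp only [List.replicate, List.range_zero, List.map_nil, List.append_nil]
    have : ∀ (q : List Int), ns.foldl (fun p n => bDfs ch d n p) q = q := by
      intro q
      have hstep : (fun (p : List Int) (n : String) => bDfs ch d n p) = fun p _ => p := by
        funext p n
        rw [bDfs, if_pos (by omega : d ≥ 10)]
      rw [hstep, List.foldl_fixed]
    exact this _
  | succ r ih =>
    intro d hd ns pre hpre
    rw [bDfs_fold_level ch d (by omega)]
    have hmid : (pre ++ List.replicate (r + 1) 0).modify d (· + (ns.length : Int))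
        = (pre ++ [(ns.length : Int)]) ++ List.replicate r 0 := by
      rw [List.replicate_succ, ← hpre, modify_append_mid]
      simp
    rw [hmid, ih (d + 1) (by omega) _ _ (by simp [hpre])]
    rw [List.range_succ_eq_map, List.map_cons, List.map_map, List.append_assoc,
      List.singleton_append]
    rfl

theorem bProfil_eq (ch : PySem.Dict String (PySem.Set String)) (moon : String) :
    bProfil ch moon = (List.range 10).map (fun k => ((lvl ch [moon] k).length : Int)) := by
  have h := bDfs_prof ch 10 0 rfl [moon] [] rfl
  simpa [bProfil] using h

-- ---- assembly ----

theorem zipCheck_eq_beq (a : List Int) : ∀ (b : List Int), a.length = b.length →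
    zipCheck (a.zip b) = (a == b) := by
  induction a with
  | nil =>
    intro b hb
    cases b with
    | nil => rfl
    | cons y ys => simp at hb
  | cons x xs ih =>
    intro b hb
    cases b with
    | nil => simp at hb
    | cons y ys =>
      show (if x ≠ y then false else zipCheck (xs.zip ys)) = ((x :: xs) == (y :: ys))
      by_cases hxy : x = y
      · subst hxy
        rw [if_neg (by simp)]
        rw [ih ys (by simpa using hb)]
        simp
      · rw [if_pos hxy]
        have : ((x :: xs) == (y :: ys)) = false := by simp [hxy]
        rw [this]

-- A's seznam for one moon equals B's profile
theorem seznam_eq (luna : String) (orbite : List (String × String)) :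
    (PySem.List.pyRange 0 10 1).foldl (fun acc x => acc ++ [sirina_orbite luna x orbite]) []
      = bProfil (bChildren orbite) luna := by
  rw [PySem.List.foldl_append_singleton_eq_map, List.nil_append]
  rw [bProfil_eq]
  have h10 : (10 : Int) = ((10 : Nat) : Int) := by norm_num
  rw [h10, PySem.List.pyRange_zero_natCast, List.map_map]
  apply List.map_congr_left
  intro k hk
  show sirina_orbite luna (k : Int) orbite = _
  rw [sirina_eq luna orbite (k : Int) (by omega)]
  simp

-- ===== VERDICT (by name: the statement is the Claim_ definition above) =====
theorem enaka_struktura_spec : Claim_equal_enaka_struktura := by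
  intro luna1 luna2 orbite _
  show enaka_struktura luna1 luna2 orbite = enaka_struktura_alt luna1 luna2 orbite
  rw [enaka_struktura, enaka_struktura_alt]
  rw [PySem.List.foldl_prod_mk (fun a x => a ++ [sirina_orbite luna1 x orbite])
    (fun b x => b ++ [sirina_orbite luna2 x orbite]) (PySem.List.pyRange 0 10 1) [] []]
  rw [seznam_eq luna1 orbite, seznam_eq luna2 orbite]
  apply zipCheck_eq_beq
  rw [bProfil_eq, bProfil_eq]
  simp
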